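-- pv_equiv track=rewrite | github.com/pypi-data/pypi-mirror-2 | packages/wizard/wizard-0.1.dev.tar.gz/wizard-0.1.dev/wizard/util.py | get_exception_name
-- ===== SOURCE A (Python) =====
-- def get_exception_name(output):
--     """
--     Reads the traceback from a Python program and grabs the
--     fully qualified exception name.
--     """
--     lines = output.split("\n")
--     cue = False
--     result = "(unknown)"
--     for line in lines[1:]:
--         line = line.rstrip()
--         if not line: continue
--         if line[0] == ' ':
--             cue = True
--             continue
--         if cue:
--             cue = False
--             return line.partition(':')[0]
--     return result
-- ===== SOURCE B (Python) =====
-- def get_exception_name(output):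
--     """
--     Reads the traceback from a Python program and grabs the
--     fully qualified exception name.
--     """
--     # materialise the significant (non-blank, rstripped) lines and a parallel
--     # indentation-flag table, then locate the answer by index arithmetic
--     sig = [s for s in (l.rstrip() for l in output.split("\n")[1:]) if s]
--     flags = [s.startswith(' ') for s in sig]
--     i = flags.index(True) if True in flags else None
--     if i is None:
--         return "(unknown)"
--     tail = flags[i:]
--     j = tail.index(False) if False in tail else None
--     if j is None:
--         return "(unknown)"
--     return sig[i + j].partition(':')[0]
-- ===== Notes on version B (the rewrite author's own statement) =====
-- stated objective: alternative
-- what changed: Replaced the stateful cue-flag line scan by a data-driven formulation: filter the rstripped lines to the non-blank ones, build a parallel list of indentation flags, and locate the answer with two .index() searches (first indented flag, then first non-indented flag after it) plus index arithmetic.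
import Mathlib
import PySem

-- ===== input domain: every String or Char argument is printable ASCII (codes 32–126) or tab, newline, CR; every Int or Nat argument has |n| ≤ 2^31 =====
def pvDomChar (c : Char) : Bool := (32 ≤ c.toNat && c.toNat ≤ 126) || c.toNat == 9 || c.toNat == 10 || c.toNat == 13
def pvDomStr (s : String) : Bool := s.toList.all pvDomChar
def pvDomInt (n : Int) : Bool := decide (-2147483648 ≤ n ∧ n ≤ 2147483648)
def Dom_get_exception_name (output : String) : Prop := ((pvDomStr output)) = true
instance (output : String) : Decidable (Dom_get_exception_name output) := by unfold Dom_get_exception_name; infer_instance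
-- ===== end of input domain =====

-- B replaces A's stateful cue-flag scan by a data-driven table lookup: filter to the
-- non-blank rstripped lines, build a parallel indentation-flag list, and find the answer
-- with two .index searches plus index arithmetic (alternative decomposition, same cost).

-- s.partition(':')[0] — exact by hand: the prefix of s before the first ':' (all of s if ':' absent)
def pvPartitionFst (s : List Char) : List Char :=
  s.takeWhile (fun c => c ≠ ':')

-- ===== PORT A =====
-- the for-loop over lines[1:] with the cue flag
def pvA_loop : List (List Char) → Bool → String
  | [], _ => "(unknown)"
  | l :: rest, cue =>
    let line := PySem.Chars.rstrip l
    if line = [] then pvA_loop rest cue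
    else if line.head? = some ' ' then pvA_loop rest true
    else if cue then String.ofList (pvPartitionFst line)
    else pvA_loop rest cue

def get_exception_name (output : String) : String :=
  pvA_loop ((PySem.Chars.splitOn output.toList ['\n']).drop 1) false

-- ===== PORT B =====
def get_exception_name_alt (output : String) : String :=
  let sig := (((PySem.Chars.splitOn output.toList ['\n']).drop 1).map PySem.Chars.rstrip).filter
      (fun s => s ≠ [])
  let flags := sig.map (fun s => PySem.Chars.startswith s [' '])
  -- "flags.index(True) if True in flags else None": index? is none exactly when the value is absent
  match PySem.List.index? flags true with
  | none => "(unknown)"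
  | some i =>
    let tail := flags.drop i
    match PySem.List.index? tail false with
    | none => "(unknown)"
    | some j =>
      -- sig[i + j] is in range whenever index? returns on tail; [·]? merely totalises it
      match sig[i + j]? with
      | none => "(unknown)"
      | some s => String.ofList (pvPartitionFst s)

-- ===== PRECONDITION & SPEC =====
def Spec_get_exception_name (output : String) (out : String) : Prop := out = get_exception_name_alt output
instance (output : String) (out : String) : Decidable (Spec_get_exception_name output out) := by unfold Spec_get_exception_name; infer_instance

-- ===== CLAIM (what is proved, stated in full; the proofs are below) =====
def Claim_equal_get_exception_name : Prop := ∀ (output : String), Dom_get_exception_name output → Spec_get_exception_name output (get_exception_name output)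

-- ===== LEMMAS AND PROOFS =====
-- the significant lines: rstripped and non-blank
def pvSig (ls : List (List Char)) : List (List Char) :=
  (ls.map PySem.Chars.rstrip).filter (fun s => s ≠ [])

-- A's loop expressed on the significant lines only
def pvS : List (List Char) → Bool → String
  | [], _ => "(unknown)"
  | s :: r, cue =>
    if s.head? = some ' ' then pvS r true
    else if cue then String.ofList (pvPartitionFst s)
    else pvS r cue

theorem pvA_loop_eq_pvS (ls : List (List Char)) (cue : Bool) :
    pvA_loop ls cue = pvS (pvSig ls) cue := by
  induction ls generalizing cue with
  | nil => rfl
  | cons l rest ih =>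
    simp only [pvA_loop, pvSig, List.map_cons, List.filter_cons]
    by_cases he : PySem.Chars.rstrip l = []
    · simp [he, ih, pvSig]
    · simp only [he, decide_not]
      simp [pvS, pvSig, ih]

-- startswith [' '] is exactly "first char is a space"
theorem pv_startswith_head (s : List Char) :
    PySem.Chars.startswith s [' '] = decide (s.head? = some ' ') := by
  cases s with
  | nil => rfl
  | cons c r =>
    by_cases h : c = ' '
    · subst h
      rw [decide_eq_true (by rfl)]
      rw [show PySem.Chars.startswith (' ' :: r) [' '] = true from by
        rw [PySem.Chars.startswith_iff, List.cons_prefix_cons]; simp]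
    · rw [decide_eq_false (by simp [h])]
      rw [Bool.eq_false_iff, Ne, PySem.Chars.startswith_iff, List.cons_prefix_cons]
      exact fun hc => h hc.1.symm

-- B's phase-2 value on a suffix: first non-indented significant line, via index?
def pvP2 (sig : List (List Char)) : String :=
  match PySem.List.index? (sig.map (fun s => decide (s.head? = some ' '))) false with
  | none => "(unknown)"
  | some j =>
    match sig[j]? with
    | none => "(unknown)"
    | some s => String.ofList (pvPartitionFst s)

-- B's full value on the significant lines
def pvBcore (sig : List (List Char)) : String :=
  match PySem.List.index? (sig.map (fun s => decide (s.head? = some ' '))) true with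
  | none => "(unknown)"
  | some i =>
    match PySem.List.index? ((sig.map (fun s => decide (s.head? = some ' '))).drop i) false with
    | none => "(unknown)"
    | some j =>
      match sig[i + j]? with
      | none => "(unknown)"
      | some s => String.ofList (pvPartitionFst s)

theorem pvP2_cons_true (s : List Char) (r : List (List Char)) (h : s.head? = some ' ') :
    pvP2 (s :: r) = pvP2 r := by
  unfold pvP2
  rw [List.map_cons, decide_eq_true h, PySem.List.index?_cons_of_ne _ (by decide)]
  cases hj : PySem.List.index? (r.map (fun s => decide (s.head? = some ' '))) false with
  | none => simp
  | some j => simp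

theorem pvP2_cons_false (s : List Char) (r : List (List Char)) (h : ¬ s.head? = some ' ') :
    pvP2 (s :: r) = String.ofList (pvPartitionFst s) := by
  unfold pvP2
  rw [List.map_cons, decide_eq_false h, PySem.List.index?_cons_self]
  simp

theorem pvBcore_cons_true (s : List Char) (r : List (List Char)) (h : s.head? = some ' ') :
    pvBcore (s :: r) = pvP2 r := by
  unfold pvBcore
  rw [List.map_cons, decide_eq_true h, PySem.List.index?_cons_self]
  simp only [List.drop_zero, Nat.zero_add]
  rw [PySem.List.index?_cons_of_ne _ (by decide)]
  unfold pvP2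
  cases hj : PySem.List.index? (r.map (fun s => decide (s.head? = some ' '))) false with
  | none => simp
  | some j => simp

theorem pvBcore_cons_false (s : List Char) (r : List (List Char)) (h : ¬ s.head? = some ' ') :
    pvBcore (s :: r) = pvBcore r := by
  unfold pvBcore
  rw [List.map_cons, decide_eq_false h, PySem.List.index?_cons_of_ne _ (by decide)]
  cases hi : PySem.List.index? (r.map (fun s => decide (s.head? = some ' '))) true with
  | none => simp
  | some i =>
    simp only [Option.map_some, List.drop_succ_cons]
    cases hj : PySem.List.index? ((r.map (fun s => decide (s.head? = some ' '))).drop i) false with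
    | none => simp
    | some j =>
      have : i + 1 + j = (i + j) + 1 := by omega
      simp [this]

theorem pvS_true_eq_pvP2 (sig : List (List Char)) : pvS sig true = pvP2 sig := by
  induction sig with
  | nil => rfl
  | cons s r ih =>
    by_cases h : s.head? = some ' '
    · rw [pvP2_cons_true s r h]; simp only [pvS, if_pos h, ih]
    · rw [pvP2_cons_false s r h]; simp [pvS, if_neg h]

theorem pvS_false_eq_pvBcore (sig : List (List Char)) : pvS sig false = pvBcore sig := by
  induction sig with
  | nil => rfl
  | cons s r ih =>
    by_cases h : s.head? = some ' '
    · rw [pvBcore_cons_true s r h]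
      simp only [pvS, if_pos h, pvS_true_eq_pvP2]
    · rw [pvBcore_cons_false s r h]
      simp [pvS, if_neg h]
      exact ih

-- ===== VERDICT (by name: the statement is the Claim_ definition above) =====
theorem get_exception_name_spec : Claim_equal_get_exception_name := by
  intro output _
  unfold Spec_get_exception_name get_exception_name get_exception_name_alt
  rw [pvA_loop_eq_pvS, pvS_false_eq_pvBcore]
  unfold pvBcore pvSig
  simp only [pv_startswith_head]
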